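-- pv_equiv track=rewrite | github.com/YJHeo01/BOJ | 222-풀링 - 17829번.py | solution
-- ===== SOURCE A (Python) =====
-- def solution(array,A,B):
--     x1,x2 = A; y1,y2 = B
--     if x2 - x1 == 2: return(second_value(array[x1][y1],array[x1+1][y1],array[x1][y1+1],array[x1+1][y1+1]))
--     mid_x, mid_y = (x1+x2) // 2, (y1+y2) // 2
--     value_A = solution(array,(x1,mid_x),(y1,mid_y))
--     value_B = solution(array,(x1,mid_x),(mid_y,y2))
--     value_C = solution(array,(mid_x,x2),(y1,mid_y))
--     value_D = solution(array,(mid_x,x2),(mid_y,y2))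
--     return second_value(value_A,value_B,value_C,value_D)
--
-- def second_value(value_A,value_B,value_C,value_D):
--     num_list = [value_A,value_B,value_C,value_D]
--     num_list.sort()
--     return num_list[2]
-- ===== SOURCE B (Python) =====
-- def solution(array, A, B):
--     x1, x2 = A
--     y1, y2 = B
--     # number of expansion levels: halve the side down to 2
--     side = x2 - x1
--     levels = 0
--     while side > 2:
--         side //= 2
--         levels += 1
--     if side != 2 or 2 ** (levels + 1) != x2 - x1:
--         raise ValueError("range side must be a power of two >= 2")
--     # breadth-first expansion of the quadrant ranges, level by level
--     ranges = [(x1, x2, y1, y2)]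
--     for _ in range(levels):
--         nxt = []
--         for (a, b, c, d) in ranges:
--             mx, my = (a + b) // 2, (c + d) // 2
--             nxt += [(a, mx, c, my), (a, mx, my, d), (mx, b, c, my), (mx, b, my, d)]
--         ranges = nxt
--     # evaluate the 2x2 leaves in order
--     vals = [sorted((array[a][c], array[a + 1][c], array[a][c + 1], array[a + 1][c + 1]))[2]
--             for (a, b, c, d) in ranges]
--     # pool bottom-up: each group of four siblings collapses to its second-largest
--     while len(vals) > 1:
--         vals = [sorted(vals[i:i + 4])[2] for i in range(0, len(vals), 4)]
--     return vals[0]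
-- ===== Notes on version B (the rewrite author's own statement) =====
-- stated objective: alternative
-- what changed: Replaces the depth-first quadrant recursion by an iterative breadth-first worklist: the range list is expanded level by level until every range has side 2, the 2x2 leaves are evaluated in order, and the value list is then repeatedly collapsed by taking the second-largest of each consecutive group of four until one value remains.
import Mathlib
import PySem

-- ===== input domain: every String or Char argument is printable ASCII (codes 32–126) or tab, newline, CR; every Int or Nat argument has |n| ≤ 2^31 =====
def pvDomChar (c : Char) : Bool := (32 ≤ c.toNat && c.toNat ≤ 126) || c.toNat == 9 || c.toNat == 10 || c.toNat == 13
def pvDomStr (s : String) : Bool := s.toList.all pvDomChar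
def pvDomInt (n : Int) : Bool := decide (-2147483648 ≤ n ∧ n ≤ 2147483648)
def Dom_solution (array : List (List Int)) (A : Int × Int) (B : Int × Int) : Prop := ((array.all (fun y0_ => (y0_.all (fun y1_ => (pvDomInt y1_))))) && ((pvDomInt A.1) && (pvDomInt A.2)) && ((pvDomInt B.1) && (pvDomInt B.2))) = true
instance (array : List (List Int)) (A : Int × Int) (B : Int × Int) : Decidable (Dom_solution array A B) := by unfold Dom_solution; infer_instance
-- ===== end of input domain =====

-- B replaces A's depth-first quadrant recursion by an iterative breadth-first worklist that
-- expands the ranges level by level and then collapses the leaf values in groups of four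
-- (objective: alternative decomposition, same asymptotic cost).

-- ===== PORT A =====
-- array[x][y]: Python raises IndexError out of range; pyGet? is none there, defaulted to 0 (such inputs are outside Pre_).
def aGet (array : List (List Int)) (x y : Int) : Int :=
  ((PySem.List.pyGet? array x).bind (fun r => PySem.List.pyGet? r y)).getD 0

-- second_value: sort the four values, take index 2 (also the expression B writes inline)
def secondValue (a b c d : Int) : Int :=
  PySem.List.pyGetD (PySem.List.sorted [a, b, c, d] (fun v => v) false) 2 0

-- A's recursion never terminates for non-power-of-two ranges (Python hits RecursionError),
-- so the port carries a fuel bounding the recursion depth; the wrapper passes (x2-x1).toNat,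
-- which exceeds the depth (log2 of the side) on every input where the Python returns.
def solutionFuel (fuel : Nat) (array : List (List Int)) (x1 x2 y1 y2 : Int) : Int :=
  match fuel with
  | 0 => 0
  | fuel + 1 =>
    if x2 - x1 = 2 then
      secondValue (aGet array x1 y1) (aGet array (x1 + 1) y1)
        (aGet array x1 (y1 + 1)) (aGet array (x1 + 1) (y1 + 1))
    else
      secondValue
        (solutionFuel fuel array x1 (PySem.Int.floordiv (x1 + x2) 2) y1 (PySem.Int.floordiv (y1 + y2) 2))
        (solutionFuel fuel array x1 (PySem.Int.floordiv (x1 + x2) 2) (PySem.Int.floordiv (y1 + y2) 2) y2)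
        (solutionFuel fuel array (PySem.Int.floordiv (x1 + x2) 2) x2 y1 (PySem.Int.floordiv (y1 + y2) 2))
        (solutionFuel fuel array (PySem.Int.floordiv (x1 + x2) 2) x2 (PySem.Int.floordiv (y1 + y2) 2) y2)

def solution (array : List (List Int)) (A : Int × Int) (B : Int × Int) : Int :=
  solutionFuel (A.2 - A.1).toNat array A.1 A.2 B.1 B.2

-- ===== PORT B =====
-- the four quadrant ranges of one range, in the order B appends them
def quadrants (r : Int × Int × Int × Int) : List (Int × Int × Int × Int) :=
  match r with
  | (a, b, c, d) =>
    [(a, PySem.Int.floordiv (a + b) 2, c, PySem.Int.floordiv (c + d) 2),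
     (a, PySem.Int.floordiv (a + b) 2, PySem.Int.floordiv (c + d) 2, d),
     (PySem.Int.floordiv (a + b) 2, b, c, PySem.Int.floordiv (c + d) 2),
     (PySem.Int.floordiv (a + b) 2, b, PySem.Int.floordiv (c + d) 2, d)]

-- the level-count loop: while side > 2: side //= 2; levels += 1
def sideLevels (side : Int) (levels : Nat) : Int × Nat :=
  if 2 < side then sideLevels (PySem.Int.floordiv side 2) (levels + 1) else (side, levels)
termination_by side.toNat
decreasing_by rw [PySem.Int.floordiv_eq_ediv_of_pos (by norm_num)]; omega

-- for _ in range(levels): split every range into its quadrants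
def expandN : Nat → List (Int × Int × Int × Int) → List (Int × Int × Int × Int)
  | 0, rs => rs
  | n + 1, rs => expandN n (rs.foldl (fun acc r => acc ++ quadrants r) [])

-- one reduction pass: vals[i:i+4] sorted, index 2, for i in range(0, len(vals), 4)
def reduceStep (vs : List Int) : List Int :=
  (PySem.List.pyRange 0 (vs.length : Int) 4).map (fun i =>
    PySem.List.pyGetD
      (PySem.List.sorted (PySem.List.slice vs (some i) (some (i + 4))) (fun v => v) false) 2 0)

lemma reduceStep_length (vs : List Int) : (reduceStep vs).length = (vs.length + 3) / 4 := by
  unfold reduceStep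
  rw [List.length_map, PySem.List.pyRange_of_pos _ _ (by norm_num), List.length_map,
    List.length_range]
  split_ifs with h
  · omega
  · omega

-- the pooling loop on the value list
def reduceLoop (vs : List Int) : List Int :=
  if 1 < vs.length then reduceLoop (reduceStep vs) else vs
termination_by vs.length
decreasing_by rw [reduceStep_length]; omega

-- Python B raises ValueError when the side is not a power of two >= 2; the port returns 0 there
-- (such inputs are outside Pre_)
def solution_alt (array : List (List Int)) (A : Int × Int) (B : Int × Int) : Int :=
  match sideLevels (A.2 - A.1) 0 with
  | (side, levels) =>
    if side = 2 ∧ (2 : Int) ^ (levels + 1) = A.2 - A.1 then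
      PySem.List.pyGetD
        (reduceLoop ((expandN levels [(A.1, A.2, B.1, B.2)]).map (fun r =>
          match r with
          | (a, _, c, _) =>
            secondValue (aGet array a c) (aGet array (a + 1) c)
              (aGet array a (c + 1)) (aGet array (a + 1) (c + 1))))) 0 0
    else 0

-- ===== PRECONDITION & SPEC =====
-- left y-coordinate of the j-th leaf column block of the floor-midpoint subdivision of (c, d) into 2^k parts
def yleaf (k j : Nat) (c d : Int) : Int :=
  PySem.Int.floordiv (((2 ^ k : Int) - (j : Int)) * c + (j : Int) * d) (2 ^ k)

-- both rows x, x+1 exist (Python indexing, negative allowed) and both columns y, y+1 exist in each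
def leafOk (array : List (List Int)) (x y : Int) : Bool :=
  match PySem.List.pyGet? array x, PySem.List.pyGet? array (x + 1) with
  | some r1, some r2 =>
      decide (PySem.Raise.InRange r1.length y) && decide (PySem.Raise.InRange r1.length (y + 1)) &&
      decide (PySem.Raise.InRange r2.length y) && decide (PySem.Raise.InRange r2.length (y + 1))
  | _, _ => false

-- Pre_ is exactly where the Python A returns: the x-range side is a power of two ≥ 2 (otherwise
-- A recurses forever) and every 2x2 leaf access of the subdivision is a valid Python index
-- (otherwise A raises IndexError).
def preCheck (array : List (List Int)) (A : Int × Int) (B : Int × Int) : Bool :=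
  (List.range 31).any (fun k =>
    if A.2 - A.1 = 2 ^ (k + 1) then
      if 2 ^ (k + 1) ≤ 2 * array.length + 1 then  -- implied by the leaf checks; keeps them finite
        (List.range (2 ^ k)).all (fun i => (List.range (2 ^ k)).all (fun j =>
          leafOk array (A.1 + 2 * (i : Int)) (yleaf k j B.1 B.2)))
      else false
    else false)

def Pre_solution (array : List (List Int)) (A : Int × Int) (B : Int × Int) : Prop :=
  preCheck array A B = true
instance (array : List (List Int)) (A : Int × Int) (B : Int × Int) : Decidable (Pre_solution array A B) := by unfold Pre_solution; infer_instance

def pvWitness_solution : List (List Int) × (Int × Int) × (Int × Int) := ([[1, 2], [3, 4]], (0, 2), (0, 2))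

def Spec_solution (array : List (List Int)) (A : Int × Int) (B : Int × Int) (out : Int) : Prop := out = solution_alt array A B
instance (array : List (List Int)) (A : Int × Int) (B : Int × Int) (out : Int) : Decidable (Spec_solution array A B out) := by unfold Spec_solution; infer_instance

-- ===== CLAIM (what is proved, stated in full; the proofs are below) =====
def Claim_equal_solution : Prop := ∀ (array : List (List Int)) (A : Int × Int) (B : Int × Int), Dom_solution array A B → Pre_solution array A B → Spec_solution array A B (solution array A B)

-- ===== LEMMAS AND PROOFS =====

-- the four quadrants as functions (same mids as `quadrants`)
def childTL (r : Int × Int × Int × Int) : Int × Int × Int × Int :=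
  (r.1, PySem.Int.floordiv (r.1 + r.2.1) 2, r.2.2.1, PySem.Int.floordiv (r.2.2.1 + r.2.2.2) 2)
def childTR (r : Int × Int × Int × Int) : Int × Int × Int × Int :=
  (r.1, PySem.Int.floordiv (r.1 + r.2.1) 2, PySem.Int.floordiv (r.2.2.1 + r.2.2.2) 2, r.2.2.2)
def childBL (r : Int × Int × Int × Int) : Int × Int × Int × Int :=
  (PySem.Int.floordiv (r.1 + r.2.1) 2, r.2.1, r.2.2.1, PySem.Int.floordiv (r.2.2.1 + r.2.2.2) 2)
def childBR (r : Int × Int × Int × Int) : Int × Int × Int × Int :=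
  (PySem.Int.floordiv (r.1 + r.2.1) 2, r.2.1, PySem.Int.floordiv (r.2.2.1 + r.2.2.2) 2, r.2.2.2)

lemma quadrants_eq (r : Int × Int × Int × Int) :
    quadrants r = [childTL r, childTR r, childBL r, childBR r] := by
  rcases r with ⟨a, b, c, d⟩; rfl

-- value of a 2x2 leaf (what B's leaf comprehension computes)
def leafVal (array : List (List Int)) (r : Int × Int × Int × Int) : Int :=
  secondValue (aGet array r.1 r.2.2.1) (aGet array (r.1 + 1) r.2.2.1)
    (aGet array r.1 (r.2.2.1 + 1)) (aGet array (r.1 + 1) (r.2.2.1 + 1))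

-- value of the whole quadrant tree of depth t+... : TVal t r is the pooled value of range r of side 2^(t+1)
def TVal (array : List (List Int)) : Nat → (Int × Int × Int × Int) → Int
  | 0, r => leafVal array r
  | t + 1, r =>
      secondValue (TVal array t (childTL r)) (TVal array t (childTR r))
        (TVal array t (childBL r)) (TVal array t (childBR r))

lemma mid_exact (a b w : Int) (h : b = a + 2 * w) :
    PySem.Int.floordiv (a + b) 2 = a + w := by
  rw [PySem.Int.floordiv_eq_ediv_of_pos (by norm_num)]
  omega

-- ===== A's recursion computes TVal =====
lemma solutionFuel_eq_TVal (array : List (List Int)) :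
    ∀ (t : Nat) (a c d : Int) (fuel : Nat), t + 1 ≤ fuel →
      solutionFuel fuel array a (a + 2 ^ (t + 1)) c d = TVal array t (a, a + 2 ^ (t + 1), c, d) := by
  intro t
  induction t with
  | zero =>
    intro a c d fuel hf
    match fuel, hf with
    | fuel + 1, _ =>
      have h2 : (a + 2 ^ (0 + 1)) - a = 2 := by ring
      simp only [solutionFuel, h2, if_pos]
      rfl
  | succ t ih =>
    intro a c d fuel hf
    match fuel, hf with
    | fuel + 1, hf =>
      have hp : ((2 : Int) ^ (t + 1 + 1)) = 2 * 2 ^ (t + 1) := by ring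
      have hbig : (4 : Int) ≤ 2 ^ (t + 1 + 1) := by
        calc (4 : Int) = 2 ^ 2 := by norm_num
        _ ≤ 2 ^ (t + 1 + 1) := by apply pow_le_pow_right₀ <;> omega
      have hne : (a + 2 ^ (t + 1 + 1)) - a ≠ 2 := by
        intro h
        rw [show (a + 2 ^ (t + 1 + 1)) - a = 2 ^ (t + 1 + 1) by ring] at h
        omega
      have hmx : PySem.Int.floordiv (a + (a + 2 ^ (t + 1 + 1))) 2 = a + 2 ^ (t + 1) :=
        mid_exact _ _ _ (by rw [hp])
      simp only [solutionFuel]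
      rw [if_neg hne, hmx]
      rw [show TVal array (t + 1) (a, a + 2 ^ (t + 1 + 1), c, d)
          = secondValue
            (TVal array t (a, PySem.Int.floordiv (a + (a + 2 ^ (t + 1 + 1))) 2, c,
              PySem.Int.floordiv (c + d) 2))
            (TVal array t (a, PySem.Int.floordiv (a + (a + 2 ^ (t + 1 + 1))) 2,
              PySem.Int.floordiv (c + d) 2, d))
            (TVal array t (PySem.Int.floordiv (a + (a + 2 ^ (t + 1 + 1))) 2, a + 2 ^ (t + 1 + 1), c,
              PySem.Int.floordiv (c + d) 2))
            (TVal array t (PySem.Int.floordiv (a + (a + 2 ^ (t + 1 + 1))) 2, a + 2 ^ (t + 1 + 1),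
              PySem.Int.floordiv (c + d) 2, d)) from rfl]
      rw [hmx]
      have hb : a + 2 ^ (t + 1 + 1) = (a + 2 ^ (t + 1)) + 2 ^ (t + 1) := by rw [hp]; ring
      congr 1
      · exact ih a c (PySem.Int.floordiv (c + d) 2) fuel (by omega)
      · exact ih a (PySem.Int.floordiv (c + d) 2) d fuel (by omega)
      · rw [hb]; exact ih (a + 2 ^ (t + 1)) c (PySem.Int.floordiv (c + d) 2) fuel (by omega)
      · rw [hb]; exact ih (a + 2 ^ (t + 1)) (PySem.Int.floordiv (c + d) 2) d fuel (by omega)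

-- ===== B's bounded expansion is the t-fold quadrant expansion =====
def expandIter : Nat → List (Int × Int × Int × Int) → List (Int × Int × Int × Int)
  | 0, rs => rs
  | t + 1, rs => expandIter t (rs.flatMap quadrants)

lemma expandN_eq_expandIter : ∀ (n : Nat) (rs : List (Int × Int × Int × Int)),
    expandN n rs = expandIter n rs := by
  intro n
  induction n with
  | zero => intro rs; rfl
  | succ n ih =>
    intro rs
    show expandN n _ = expandIter n _
    rw [PySem.List.foldl_append_eq_flatMap, List.nil_append, ih]

lemma sideLevels_pow : ∀ (k acc : Nat), sideLevels ((2 : Int) ^ (k + 1)) acc = (2, acc + k) := by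
  intro k
  induction k with
  | zero => intro acc; rw [sideLevels]; norm_num
  | succ k ih =>
    intro acc
    have hbig : (4 : Int) ≤ 2 ^ (k + 1 + 1) := by
      calc (4 : Int) = 2 ^ 2 := by norm_num
      _ ≤ 2 ^ (k + 1 + 1) := by apply pow_le_pow_right₀ <;> omega
    have hp : ((2 : Int) ^ (k + 1 + 1)) = 2 * 2 ^ (k + 1) := by ring
    have hdiv : PySem.Int.floordiv ((2 : Int) ^ (k + 1 + 1)) 2 = 2 ^ (k + 1) := by
      rw [PySem.Int.floordiv_eq_ediv_of_pos (by norm_num), hp]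
      omega
    rw [sideLevels, if_pos (by omega), hdiv, ih]
    rw [show acc + 1 + k = acc + (k + 1) by omega]

-- ===== one reduction pass collapses each quadruple of sibling values =====
lemma reduceStep_eq (vs : List Int) :
    reduceStep vs = (List.range ((vs.length + 3) / 4)).map (fun k =>
      PySem.List.pyGetD
        (PySem.List.sorted ((vs.drop (4 * k)).take 4) (fun v => v) false) 2 0) := by
  unfold reduceStep
  rw [PySem.List.pyRange_of_pos _ _ (by norm_num), List.map_map]
  rw [show (if (0 : Int) < (vs.length : Int) then (((vs.length : Int) - 0 + 4 - 1) / 4).toNat else 0)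
      = (vs.length + 3) / 4 by split_ifs with h <;> omega]
  apply List.map_congr_left
  intro k hk
  simp only [Function.comp_apply]
  have c1 : (0 : Int) + 4 * (k : Int) = ((4 * k : Nat) : Int) := by push_cast; ring
  have c2 : (0 : Int) + 4 * (k : Int) + 4 = ((4 * k + 4 : Nat) : Int) := by push_cast; ring
  rw [c2, c1, PySem.List.slice_natCast]
  rw [show 4 * k + 4 - 4 * k = 4 by omega]

lemma reduceStep_cons4 (w1 w2 w3 w4 : Int) (rest : List Int) :
    reduceStep (w1 :: w2 :: w3 :: w4 :: rest) = secondValue w1 w2 w3 w4 :: reduceStep rest := by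
  rw [reduceStep_eq, reduceStep_eq]
  rw [show (w1 :: w2 :: w3 :: w4 :: rest).length + 3 = (rest.length + 3) + 4 by
    simp only [List.length_cons]]
  rw [show ((rest.length + 3) + 4) / 4 = (rest.length + 3) / 4 + 1 by omega]
  rw [List.range_succ_eq_map, List.map_cons, List.map_map]
  congr 1

lemma reduceStep_flatMap (array : List (List Int)) (t : Nat) :
    ∀ rs : List (Int × Int × Int × Int),
      reduceStep ((rs.flatMap quadrants).map (TVal array t)) = rs.map (TVal array (t + 1)) := by
  intro rs
  induction rs with
  | nil => rfl
  | cons r rest ih =>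
    rw [List.flatMap_cons, quadrants_eq, List.map_append, List.map_cons, List.map_cons,
      List.map_cons, List.map_cons, List.map_nil]
    simp only [List.cons_append, List.nil_append]
    rw [reduceStep_cons4, ih]
    rfl

lemma flatMap_quadrants_length : ∀ rs : List (Int × Int × Int × Int),
    (rs.flatMap quadrants).length = 4 * rs.length := by
  intro rs
  induction rs with
  | nil => rfl
  | cons r rest ih =>
    rw [List.flatMap_cons, List.length_append, ih, quadrants_eq]
    simp only [List.length_cons, List.length_nil]
    omega

lemma reduceLoop_expandIter (array : List (List Int)) :
    ∀ (t : Nat) (rs : List (Int × Int × Int × Int)),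
      reduceLoop ((expandIter t rs).map (TVal array 0)) = reduceLoop (rs.map (TVal array t)) := by
  intro t
  induction t with
  | zero => intro rs; rfl
  | succ t ih =>
    intro rs
    rw [show expandIter (t + 1) rs = expandIter t (rs.flatMap quadrants) from rfl, ih]
    match rs with
    | [] => rfl
    | r :: rest =>
      rw [reduceLoop]
      rw [if_pos (by
        rw [List.length_map, flatMap_quadrants_length]
        simp only [List.length_cons]
        omega)]
      rw [reduceStep_flatMap]

-- extraction of the single final value
lemma preCheck_width (array : List (List Int)) (A : Int × Int) (B : Int × Int)
    (h : preCheck array A B = true) : ∃ k : Nat, A.2 - A.1 = 2 ^ (k + 1) := by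
  unfold preCheck at h
  rw [List.any_eq_true] at h
  obtain ⟨k, -, hk⟩ := h
  split_ifs at hk with h1 h2
  · exact ⟨k, h1⟩

lemma reduceLoop_singleton (v : Int) : reduceLoop [v] = [v] := by
  rw [reduceLoop]; rfl

-- ===== VERDICT (by name: the statement is the Claim_ definition above) =====
theorem solution_spec : Claim_equal_solution := by
  unfold Claim_equal_solution
  intro array A B _ hpre
  unfold Pre_solution at hpre
  obtain ⟨k, hk⟩ := preCheck_width array A B hpre
  unfold Spec_solution solution solution_alt
  have hA2 : A.2 = A.1 + 2 ^ (k + 1) := by omega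
  have hfuel : (A.2 - A.1).toNat = 2 ^ ((k + 1 : Nat) : Nat) := by
    rw [hk, show ((2 : Int) ^ (k + 1)) = ((2 ^ (k + 1) : Nat) : Int) by push_cast; ring,
      Int.toNat_natCast]
  have lhs : solutionFuel (A.2 - A.1).toNat array A.1 A.2 B.1 B.2
      = TVal array k (A.1, A.1 + 2 ^ (k + 1), B.1, B.2) := by
    rw [hfuel, hA2]
    exact solutionFuel_eq_TVal array k A.1 B.1 B.2 _ (Nat.le_of_lt Nat.lt_two_pow_self)
  rw [lhs]
  rw [hk, sideLevels_pow k 0]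
  simp only [Nat.zero_add]
  simp only [and_self, if_true]
  rw [expandN_eq_expandIter]
  rw [show (fun r : Int × Int × Int × Int =>
      secondValue (aGet array r.1 r.2.2.1) (aGet array (r.1 + 1) r.2.2.1)
        (aGet array r.1 (r.2.2.1 + 1)) (aGet array (r.1 + 1) (r.2.2.1 + 1))) = TVal array 0 by
    funext r; rcases r with ⟨a, b, c, d⟩; rfl]
  rw [reduceLoop_expandIter, List.map_singleton, reduceLoop_singleton,
    PySem.List.pyGetD_zero_cons]
  rw [hA2]
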